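-- pv_equiv track=rewrite | github.com/emerzon/mt-data-mcp | src/mtdata/utils/minimal_output_toon.py | _quote_if_needed
-- ===== SOURCE A (Python) =====
-- _DEFAULT_DELIMITER = ","
--
-- def _quote_if_needed(text: str, delimiter: str = _DEFAULT_DELIMITER) -> str:
--     if text is None:
--         return ""
--     raw = str(text)
--     needs_quote = raw.strip() != raw or any(
--         ch in raw for ch in (delimiter, ":", "\n", "\r", '"', "|", "\t")
--     )
--     if not needs_quote:
--         return raw
--     escaped = raw.replace("\\", "\\\\").replace('"', '\\"')
--     return f'"{escaped}"'
-- ===== SOURCE B (Python) =====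
-- _DEFAULT_DELIMITER = ","
--
-- _SPECIALS = ':\n\r"|\t'
--
-- def _quote_if_needed(text, delimiter=_DEFAULT_DELIMITER):
--     if text is None:
--         return ""
--     raw = str(text)
--     # single fused pass: build the escaped text while detecting special characters
--     needs = (bool(raw) and (raw[0].isspace() or raw[-1].isspace())) or delimiter in raw
--     pieces = []
--     for ch in raw:
--         if ch in _SPECIALS:
--             needs = True
--         if ch == "\\":
--             pieces.append("\\\\")
--         elif ch == '"':
--             pieces.append('\\"')
--         else:
--             pieces.append(ch)
--     if needs:
--         return '"' + "".join(pieces) + '"'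
--     return raw
-- ===== Notes on version B (the rewrite author's own statement) =====
-- stated objective: alternative
-- what changed: B fuses everything into one character pass with an accumulator: it builds the escaped text and the special-character flag simultaneously while scanning raw once (plus one substring test for the runtime delimiter and an inspection of the first/last character instead of strip), whereas A does staged passes: a strip pass, seven substring scans, and two whole-string .replace passes.
import Mathlib
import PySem

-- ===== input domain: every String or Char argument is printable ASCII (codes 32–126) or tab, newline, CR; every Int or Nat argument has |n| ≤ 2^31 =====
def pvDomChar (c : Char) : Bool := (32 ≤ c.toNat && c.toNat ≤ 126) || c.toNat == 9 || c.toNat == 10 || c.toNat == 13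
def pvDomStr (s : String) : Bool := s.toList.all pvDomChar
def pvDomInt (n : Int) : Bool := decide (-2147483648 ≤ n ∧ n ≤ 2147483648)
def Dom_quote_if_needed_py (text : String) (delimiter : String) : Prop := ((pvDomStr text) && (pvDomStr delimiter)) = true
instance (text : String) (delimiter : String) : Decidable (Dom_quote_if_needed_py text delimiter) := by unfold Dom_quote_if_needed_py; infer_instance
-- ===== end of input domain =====

-- B replaces A's staged passes (strip, seven substring scans, two .replace passes) by one fused
-- character pass building the escaped text and the needs-quote flag together; same return value.

-- ===== PORT A =====
-- Literal port of A: strip-check, then any over the 7 patterns (substring containment each),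
-- then two whole-string replace passes if quoting is needed.
def quote_if_needed_py (text : String) (delimiter : String) : String :=
  let raw := text
  let needs_quote :=
    (!(PySem.Str.strip raw == raw)) ||
    ([delimiter, ":", "\n", "\r", "\"", "|", "\t"].any (fun ch => PySem.Str.isIn ch raw))
  if !needs_quote then raw
  else
    let escaped := PySem.Str.replace (PySem.Str.replace raw "\\" "\\\\") "\"" "\\\""
    "\"" ++ escaped ++ "\""

-- ===== PORT B =====
-- per-character escape of B's loop body
def pvEsc (ch : Char) : List Char :=
  if ch = '\\' then ['\\', '\\'] else if ch = '"' then ['\\', '"'] else [ch]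

-- Port of B: the first/last-character whitespace test and one delimiter containment test seed the
-- flag; then ONE fold over the characters simultaneously extends the flag (membership in the fixed
-- specials string) and appends the escaped form of each character to the accumulator.
def quote_if_needed_py_alt (text : String) (delimiter : String) : String :=
  let raw := text.toList
  let needs0 :=
    (match raw with
     | [] => false
     | c :: rest => PySem.Chars.isspace c || PySem.Chars.isspace (rest.getLastD c)) ||
    PySem.Chars.isIn delimiter.toList raw
  let st := raw.foldl
    (fun (st : Bool × List Char) ch =>
      (st.1 || ((":\n\r\"|\t".toList).contains ch), st.2 ++ pvEsc ch))
    (needs0, [])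
  if st.1 then String.ofList ('"' :: st.2 ++ ['"']) else text

-- ===== PRECONDITION & SPEC =====
def Spec_quote_if_needed_py (text : String) (delimiter : String) (out : String) : Prop := out = quote_if_needed_py_alt text delimiter
instance (text : String) (delimiter : String) (out : String) : Decidable (Spec_quote_if_needed_py text delimiter out) := by unfold Spec_quote_if_needed_py; infer_instance

-- ===== CLAIM (what is proved, stated in full; the proofs are below) =====
def Claim_equal_quote_if_needed_py : Prop := ∀ (text : String) (delimiter : String), Dom_quote_if_needed_py text delimiter → Spec_quote_if_needed_py text delimiter (quote_if_needed_py text delimiter)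

-- ===== LEMMAS AND PROOFS =====

-- [c] is an infix of l iff c is an element of l.
theorem singleton_infix_iff (c : Char) (l : List Char) : [c] <:+: l ↔ c ∈ l := by
  constructor
  · intro h
    exact (List.singleton_sublist).1 h.sublist
  · intro h
    obtain ⟨s, t, rfl⟩ := List.append_of_mem h
    exact ⟨s, t, by simp⟩

-- B's fused fold = (flag extended by 'any special', accumulator extended by the escaped string).
theorem foldl_escape (l : List Char) (n0 : Bool) (a0 : List Char) :
    l.foldl
      (fun (st : Bool × List Char) ch =>
        (st.1 || ((":\n\r\"|\t".toList).contains ch), st.2 ++ pvEsc ch))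
      (n0, a0)
    = (n0 || l.any (fun ch => (":\n\r\"|\t".toList).contains ch), a0 ++ l.flatMap pvEsc) := by
  induction l generalizing n0 a0 with
  | nil => simp
  | cons c t ih =>
    rw [List.foldl_cons, ih]
    simp [Bool.or_assoc]

-- strip leaves l unchanged iff neither end starts with whitespace.
theorem strip_eq_self_iff (l : List Char) :
    PySem.Chars.strip l = l ↔
      (l.dropWhile PySem.Chars.isspace = l ∧ l.reverse.dropWhile PySem.Chars.isspace = l.reverse) := by
  constructor
  · intro h
    have hlen1 : (l.dropWhile PySem.Chars.isspace).length ≤ l.length :=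
      List.length_dropWhile_le _ _
    have hlen2 : (PySem.Chars.strip l).length ≤ (l.dropWhile PySem.Chars.isspace).length := by
      simpa [PySem.Chars.strip, PySem.Chars.rstrip, PySem.Chars.lstrip] using
        List.length_dropWhile_le PySem.Chars.isspace (l.dropWhile PySem.Chars.isspace).reverse
    have hlen : (PySem.Chars.strip l).length = l.length := by rw [h]
    have h1 : l.dropWhile PySem.Chars.isspace = l :=
      List.IsSuffix.eq_of_length (List.dropWhile_suffix _) (by omega)
    refine ⟨h1, ?_⟩
    have h2 : (l.reverse.dropWhile PySem.Chars.isspace).reverse = l := by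
      have := h
      simpa [PySem.Chars.strip, PySem.Chars.rstrip, PySem.Chars.lstrip, h1] using this
    calc l.reverse.dropWhile PySem.Chars.isspace
        = (l.reverse.dropWhile PySem.Chars.isspace).reverse.reverse := by simp
      _ = l.reverse := by rw [h2]
  · rintro ⟨h1, h2⟩
    simp [PySem.Chars.strip, PySem.Chars.lstrip, PySem.Chars.rstrip, h1, h2]

-- head of (c :: rest).reverse is the last element
theorem reverse_cons_getElem_zero (c : Char) (rest : List Char) :
    (c :: rest).reverse[0]'(by simp) = rest.getLastD c := by
  have h1 : (c :: rest).reverse[0]? = some (rest.getLastD c) := by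
    rw [← List.head?_eq_getElem?, List.head?_reverse]
    simp only [List.getLast?_cons, List.getLastD_eq_getLast?]
  have h2 : (c :: rest).reverse[0]? = some ((c :: rest).reverse[0]'(by simp)) :=
    List.getElem?_eq_getElem _
  rw [h1] at h2
  exact (Option.some.inj h2).symm

-- the strip-test of A equals the first/last-character test of B
theorem strip_beq_eq (l : List Char) :
    (PySem.Chars.strip l == l) =
      !(match l with
        | [] => false
        | c :: rest => PySem.Chars.isspace c || PySem.Chars.isspace (rest.getLastD c)) := by
  cases l with
  | nil => simp [PySem.Chars.strip, PySem.Chars.lstrip, PySem.Chars.rstrip]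
  | cons c rest =>
    rw [Bool.eq_iff_iff]
    simp only [beq_iff_eq, Bool.not_eq_eq_eq_not, Bool.not_true, Bool.or_eq_false_iff,
      strip_eq_self_iff, List.dropWhile_eq_self_iff]
    constructor
    · rintro ⟨h1, h2⟩
      refine ⟨by simpa using h1 (by simp), ?_⟩
      have := h2 (by simp)
      rw [reverse_cons_getElem_zero] at this
      simpa using this
    · rintro ⟨h1, h2⟩
      refine ⟨fun _ => by simpa using h1, fun _ => ?_⟩
      rw [reverse_cons_getElem_zero]
      simpa using h2

-- replace with a single-character pattern is the per-character flatMap (fuel-generalised go)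
theorem replace_go_single (a : Char) (new : List Char) :
    ∀ (fuel : Nat) (l acc : List Char), l.length ≤ fuel →
      PySem.Chars.replace.go [a] new fuel l acc
        = acc.reverse ++ l.flatMap (fun c => if c = a then new else [c]) := by
  intro fuel
  induction fuel with
  | zero =>
    intro l acc hl
    have : l = [] := by
      cases l with
      | nil => rfl
      | cons c t => simp at hl
    subst this
    simp [PySem.Chars.replace.go]
  | succ n ih =>
    intro l acc hl
    cases l with
    | nil => simp [PySem.Chars.replace.go]
    | cons c t =>
      by_cases h : c = a
      · subst h
        have hpre : [c].isPrefixOf (c :: t) = true := by simp [List.isPrefixOf]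
        simp only [PySem.Chars.replace.go, hpre, if_true]
        rw [ih _ _ (by simpa using Nat.le_of_succ_le_succ hl)]
        simp
      · have hpre : [a].isPrefixOf (c :: t) = false := by
          simp [List.isPrefixOf]
          exact fun hh => absurd hh.symm h
        simp only [PySem.Chars.replace.go, hpre, Bool.false_eq_true, if_false]
        rw [ih _ _ (by simpa using Nat.le_of_succ_le_succ hl)]
        simp [h]

theorem replace_single (l : List Char) (a : Char) (new : List Char) :
    PySem.Chars.replace l [a] new = l.flatMap (fun c => if c = a then new else [c]) := by
  rw [PySem.Chars.replace]
  simp only [List.isEmpty_cons, Bool.false_eq_true, if_false]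
  exact replace_go_single a new l.length l [] (le_refl _)

-- A's two replace passes compose to B's per-character escape
theorem escape_eq (l : List Char) :
    PySem.Chars.replace (PySem.Chars.replace l ['\\'] ['\\', '\\']) ['"'] ['\\', '"']
      = l.flatMap pvEsc := by
  rw [replace_single, replace_single, List.flatMap_assoc]
  apply List.flatMap_congr
  intro c _
  by_cases h1 : c = '\\'
  · subst h1; simp [pvEsc]
  · by_cases h2 : c = '"'
    · subst h2; simp [pvEsc]
    · simp [pvEsc, h1, h2]

-- the two needs-quote booleans coincide
theorem needs_eq (l : List Char) (d : List Char) :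
    ((!(PySem.Chars.strip l == l)) ||
      ([d, [':'], ['\n'], ['\r'], ['"'], ['|'], ['\t']].any (fun ch => PySem.Chars.isIn ch l)))
    = (((match l with
        | [] => false
        | c :: rest => PySem.Chars.isspace c || PySem.Chars.isspace (rest.getLastD c)) ||
        PySem.Chars.isIn d l) ||
      l.any (fun ch => ((":\n\r\"|\t".toList).contains ch))) := by
  rw [strip_beq_eq, Bool.not_not, Bool.eq_iff_iff]
  have hsp : ((":\n\r\"|\t" : String).toList) = [':', '\n', '\r', '"', '|', '\t'] := rfl
  rw [hsp]
  simp only [Bool.or_eq_true, List.any_cons, List.any_nil, Bool.or_false,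
    PySem.Chars.isIn_iff_infix, singleton_infix_iff, List.any_eq_true,
    List.contains_eq_mem, decide_eq_true_eq]
  constructor
  · rintro (hs | hd | h | h | h | h | h | h)
    · exact Or.inl (Or.inl hs)
    · exact Or.inl (Or.inr hd)
    all_goals exact Or.inr ⟨_, h, by simp⟩
  · rintro ((hs | hd) | ⟨x, hx, hm⟩)
    · exact Or.inl hs
    · exact Or.inr (Or.inl hd)
    · simp only [List.mem_cons, List.not_mem_nil, or_false] at hm
      rcases hm with rfl | rfl | rfl | rfl | rfl | rfl <;> simp [hx]

-- ===== VERDICT (by name: the statement is the Claim_ definition above) =====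
theorem quote_if_needed_py_spec : Claim_equal_quote_if_needed_py := by
  intro text delimiter _
  unfold Spec_quote_if_needed_py quote_if_needed_py quote_if_needed_py_alt
  simp only [foldl_escape, List.nil_append]
  have hA :
      ((!(PySem.Str.strip text == text)) ||
        ([delimiter, ":", "\n", "\r", "\"", "|", "\t"].any (fun ch => PySem.Str.isIn ch text)))
      = (((match text.toList with
          | [] => false
          | c :: rest => PySem.Chars.isspace c || PySem.Chars.isspace (rest.getLastD c)) ||
          PySem.Chars.isIn delimiter.toList text.toList) ||
        text.toList.any (fun ch => (":\n\r\"|\t".toList).contains ch)) := by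
    have h1 : (PySem.Str.strip text == text) = (PySem.Chars.strip text.toList == text.toList) := by
      rw [Bool.eq_iff_iff]
      simp only [beq_iff_eq]
      constructor
      · intro h
        rw [← PySem.Str.toList_strip, h]
      · intro h
        apply String.toList_inj.mp
        rw [PySem.Str.toList_strip, h]
    have h2 : ∀ (p : String), PySem.Str.isIn p text = PySem.Chars.isIn p.toList text.toList := by
      intro p
      simp [PySem.Str.isIn]
    rw [h1]
    simp only [List.any_cons, List.any_nil, h2]
    have := needs_eq text.toList delimiter.toList
    simpa using this
  rw [hA]
  cases h : (((match text.toList with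
      | [] => false
      | c :: rest => PySem.Chars.isspace c || PySem.Chars.isspace (rest.getLastD c)) ||
      PySem.Chars.isIn delimiter.toList text.toList) ||
    text.toList.any (fun ch => (":\n\r\"|\t".toList).contains ch)) with
  | false => simp
  | true =>
    simp only [Bool.not_true, Bool.false_eq_true, if_false, if_true]
    apply String.toList_inj.mp
    rw [String.toList_append, String.toList_append]
    simp only [PySem.Str.toList_replace]
    have : ("\\" : String).toList = ['\\'] ∧ ("\\\\" : String).toList = ['\\', '\\'] ∧
        ("\"" : String).toList = ['"'] ∧ ("\\\"" : String).toList = ['\\', '"'] := ⟨rfl, rfl, rfl, rfl⟩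
    obtain ⟨e1, e2, e3, e4⟩ := this
    rw [e1, e2, e3, e4, escape_eq]
    simp
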